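-- pv_equiv track=rewrite | github.com/zuke-as-Dev/dba_TensiStrength | sentistrength_bd_algo/dbapp/dbalgo_logic/single_function.py | psy_word
-- ===== SOURCE A (Python) =====
-- def psy_word(data:list):
--     final_list= data
--     psy= []
--     psy_study=''
--     all_digits = ['0', '1', '2', '3', '4', '5', '6', '7', '8', '9']
--     all_digits_neg = ['1', '2', '3', '4', '5', '6', '7', '8', '9','0', '-1',   '-2', '-3', '-4', '-5', '-6', '-7', '-8', '-9']
--     for word in final_list:
--         word=word.rstrip()
--         total_digits=0
--         for s in word:
--             if s in all_digits and word[0:1] not in all_digits: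
--                 total_digits += 1
--         if total_digits==0:
--             psy_study=psy_study+str(word)+'\n'
--     psy=(psy_study.split())
--     return psy
-- ===== SOURCE B (Python) =====
-- def psy_word(data: list):
--     digits = "0123456789"
--     result = []
--     for word in data:
--         word = word.rstrip()
--         if (word and word[0] in digits) or all(c not in digits for c in word):
--             result.extend(word.split())
--     return result
-- ===== Notes on version B (the rewrite author's own statement) =====
-- stated objective: simpler
-- what changed: Instead of accumulating kept words into one big '\n'-joined string and whitespace-splitting it at the end (two passes plus an O(n^2) string build), B tokenizes each kept word directly with word.split() and extends a result list in a single pass; the digit test uses short-circuit any()/first-char check instead of counting every digit.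
import Mathlib
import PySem

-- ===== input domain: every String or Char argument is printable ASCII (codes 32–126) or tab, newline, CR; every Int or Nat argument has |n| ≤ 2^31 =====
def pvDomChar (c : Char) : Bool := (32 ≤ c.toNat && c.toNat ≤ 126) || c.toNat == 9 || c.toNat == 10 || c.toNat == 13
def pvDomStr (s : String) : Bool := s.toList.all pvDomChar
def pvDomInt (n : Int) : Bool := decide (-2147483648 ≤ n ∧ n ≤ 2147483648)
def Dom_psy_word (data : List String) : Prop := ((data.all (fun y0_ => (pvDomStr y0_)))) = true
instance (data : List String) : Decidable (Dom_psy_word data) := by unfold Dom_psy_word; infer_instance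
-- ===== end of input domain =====

-- B replaces A's two-pass build-one-big-'\n'-joined-string-then-split() with a single pass that
-- tokenizes each kept word directly into the result list (objective: simpler decomposition).

-- ===== PORT A =====
-- Ported over code-point lists (Python str = List Char) via PySem.Chars; the unused
-- variable all_digits_neg of the Python is omitted (it is never read).
def dA : List (List Char) :=
  [['0'], ['1'], ['2'], ['3'], ['4'], ['5'], ['6'], ['7'], ['8'], ['9']]

def psy_word (data : List String) : List String :=
  -- the local list all_digits is hoisted to the top-level constant dA (same literal value)
  let psy_study : List Char :=
    data.foldl (fun psy_study word =>
      let word := PySem.Chars.rstrip word.toList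
      let total_digits : Nat :=
        word.foldl (fun total_digits s =>
          if dA.contains [s] &&
              !(dA.contains (PySem.Chars.slice word (some 0) (some 1))) then
            total_digits + 1
          else total_digits) 0
      if total_digits == 0 then psy_study ++ word ++ ['\n'] else psy_study) []
  (PySem.Chars.split₀ psy_study).map String.mk

-- ===== PORT B =====
-- the local variable digits = "0123456789" is inlined
def psy_word_alt (data : List String) : List String :=
  data.foldl (fun result word =>
    let word := PySem.Chars.rstrip word.toList
    -- 'word and word[0] in digits' (truthiness of word = nonempty)
    let first_digit := match word with
      | c :: _ => ("0123456789".toList).contains c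
      | [] => false
    if first_digit || word.all (fun c => !("0123456789".toList).contains c) then
      result ++ (PySem.Chars.split₀ word).map String.mk
    else result) []

-- ===== PRECONDITION & SPEC =====
def Spec_psy_word (data : List String) (out : List String) : Prop := out = psy_word_alt data
instance (data : List String) (out : List String) : Decidable (Spec_psy_word data out) := by unfold Spec_psy_word; infer_instance

-- ===== CLAIM (what is proved, stated in full; the proofs are below) =====
def Claim_equal_psy_word : Prop := ∀ (data : List String), Dom_psy_word data → Spec_psy_word data (psy_word data)

-- ===== LEMMAS AND PROOFS =====

-- B's keep condition on the (already rstripped) word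
def keepW (w : List Char) : Bool :=
  (match w with
    | c :: _ => ("0123456789".toList).contains c
    | [] => false) || w.all (fun c => !("0123456789".toList).contains c)

theorem go_nil (cur : List Char) (acc : List (List Char)) :
    PySem.Chars.split₀.go [] cur acc =
      if cur.isEmpty then acc.reverse else (cur.reverse :: acc).reverse := by
  simp [PySem.Chars.split₀.go]

theorem go_cons (c : Char) (rest cur : List Char) (acc : List (List Char)) :
    PySem.Chars.split₀.go (c :: rest) cur acc =
      if PySem.Chars.isspace c then
        (if cur.isEmpty then PySem.Chars.split₀.go rest [] acc
         else PySem.Chars.split₀.go rest [] (cur.reverse :: acc))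
      else PySem.Chars.split₀.go rest (c :: cur) acc := by
  rw [PySem.Chars.split₀.go]

theorem go_acc (s : List Char) : ∀ (cur : List Char) (acc : List (List Char)),
    PySem.Chars.split₀.go s cur acc = acc.reverse ++ PySem.Chars.split₀.go s cur [] := by
  induction s with
  | nil =>
    intro cur acc
    rw [go_nil, go_nil]
    split_ifs <;> simp only [List.reverse_cons, List.reverse_nil, List.nil_append, List.append_nil]
  | cons c rest ih =>
    intro cur acc
    rw [go_cons, go_cons]
    split_ifs with h1 h2
    · exact ih [] acc
    · rw [ih [] (cur.reverse :: acc), ih [] [cur.reverse]]; simp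
    · exact ih (c :: cur) acc

theorem go_append_nl (a : List Char) : ∀ (b cur : List Char) (acc : List (List Char)),
    PySem.Chars.split₀.go (a ++ '\n' :: b) cur acc =
      PySem.Chars.split₀.go a cur acc ++ PySem.Chars.split₀.go b [] [] := by
  induction a with
  | nil =>
    intro b cur acc
    have hs : PySem.Chars.isspace '\n' = true := by decide
    simp only [List.nil_append]
    rw [go_cons, go_nil, if_pos hs]
    split_ifs with h
    · exact go_acc b [] acc
    · exact go_acc b [] (cur.reverse :: acc)
  | cons c rest ih =>
    intro b cur acc
    simp only [List.cons_append]
    rw [go_cons, go_cons]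
    split_ifs with h1 h2 <;> simp [ih]

theorem split₀_append_nl (a b : List Char) :
    PySem.Chars.split₀ (a ++ '\n' :: b) = PySem.Chars.split₀ a ++ PySem.Chars.split₀ b := by
  simp only [PySem.Chars.split₀]
  exact go_append_nl a b [] []

theorem split₀_flat (ws : List (List Char)) :
    PySem.Chars.split₀ (ws.flatMap (fun w => w ++ ['\n'])) = ws.flatMap PySem.Chars.split₀ := by
  induction ws with
  | nil => decide
  | cons w rest ih =>
    have : (w ++ ['\n']) ++ rest.flatMap (fun w => w ++ ['\n'])
        = w ++ '\n' :: rest.flatMap (fun w => w ++ ['\n']) := by simp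
    simp only [List.flatMap_cons, this, split₀_append_nl, ih]

theorem foldl_count (p : Char → Bool) (l : List Char) : ∀ (n : Nat),
    l.foldl (fun t s => if p s then t + 1 else t) n = n + l.countP p := by
  induction l with
  | nil => intro n; simp
  | cons c rest ih =>
    intro n
    by_cases h : p c <;> simp [List.countP_cons, h, ih] <;> omega

theorem mem_dA (s : Char) : dA.contains [s] = ("0123456789".toList).contains s := by
  simp [dA, List.contains_eq_mem]

-- A's inner digit-count test equals B's keep condition, on the rstripped word
theorem condA_eq (w : List Char) :
    ((w.foldl (fun total_digits s =>
        if dA.contains [s] && !(dA.contains (PySem.Chars.slice w (some 0) (some 1))) then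
          total_digits + 1
        else total_digits) 0) == 0) = keepW w := by
  cases w with
  | nil => decide
  | cons c rest =>
    have hsl : PySem.Chars.slice (c :: rest) (some 0) (some 1) = [c] := by
      simp [PySem.List.slice]
    rw [hsl, foldl_count (fun s => dA.contains [s] && !(dA.contains [c]))]
    by_cases hd : ("0123456789".toList).contains c = true
    · have hdd : dA.contains [c] = true := by rw [mem_dA]; exact hd
      simp only [keepW, hdd, Bool.not_true, Bool.and_false, List.countP_false, hd,
        Bool.true_or]
      simp [Function.const]
    · have hd' : ("0123456789".toList).contains c = false := by simpa using hd
      have hdd : dA.contains [c] = false := by rw [mem_dA]; exact hd'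
      simp only [hdd, Bool.not_false, Bool.and_true, keepW, hd', Bool.false_or, Nat.zero_add]
      have hp : (fun s => dA.contains [s]) = (fun s => ("0123456789".toList).contains s) :=
        funext mem_dA
      rw [hp]
      apply Bool.eq_iff_iff.mpr
      simp [List.countP_eq_zero, List.all_eq_true]

def keptOf (data : List String) : List (List Char) :=
  (data.map (fun w => PySem.Chars.rstrip w.toList)).filter keepW

theorem stepA (init : List Char) (w : String) :
    (let word := PySem.Chars.rstrip w.toList
      let total_digits : Nat :=
        word.foldl (fun total_digits s =>
          if dA.contains [s] && !(dA.contains (PySem.Chars.slice word (some 0) (some 1))) then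
            total_digits + 1
          else total_digits) 0
      if total_digits == 0 then init ++ word ++ ['\n'] else init)
    = (if keepW (PySem.Chars.rstrip w.toList) then
        init ++ PySem.Chars.rstrip w.toList ++ ['\n'] else init) := by
  simp only [condA_eq]

theorem foldA (data : List String) : ∀ (init : List Char),
    data.foldl (fun psy_study word =>
      let word := PySem.Chars.rstrip word.toList
      let total_digits : Nat :=
        word.foldl (fun total_digits s =>
          if dA.contains [s] && !(dA.contains (PySem.Chars.slice word (some 0) (some 1))) then
            total_digits + 1
          else total_digits) 0
      if total_digits == 0 then psy_study ++ word ++ ['\n'] else psy_study) init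
    = init ++ (keptOf data).flatMap (fun w => w ++ ['\n']) := by
  induction data with
  | nil => intro init; simp [keptOf]
  | cons w rest ih =>
    intro init
    rw [List.foldl_cons, stepA, ih]
    simp only [keptOf, List.map_cons, List.filter_cons]
    by_cases hk : keepW (PySem.Chars.rstrip w.toList) <;> simp [hk]

theorem stepB (init : List String) (w : String) :
    (let word := PySem.Chars.rstrip w.toList
      let first_digit := match word with
        | c :: _ => ("0123456789".toList).contains c
        | [] => false
      if first_digit || word.all (fun c => !("0123456789".toList).contains c) then
        init ++ (PySem.Chars.split₀ word).map String.mk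
      else init)
    = (if keepW (PySem.Chars.rstrip w.toList) then
        init ++ (PySem.Chars.split₀ (PySem.Chars.rstrip w.toList)).map String.mk else init) := by
  rfl

theorem foldB (data : List String) : ∀ (init : List String),
    data.foldl (fun result word =>
      let word := PySem.Chars.rstrip word.toList
      let first_digit := match word with
        | c :: _ => ("0123456789".toList).contains c
        | [] => false
      if first_digit || word.all (fun c => !("0123456789".toList).contains c) then
        result ++ (PySem.Chars.split₀ word).map String.mk
      else result) init
    = init ++ (keptOf data).flatMap (fun w => (PySem.Chars.split₀ w).map String.mk) := by
  induction data with
  | nil => intro init; simp [keptOf]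
  | cons w rest ih =>
    intro init
    rw [List.foldl_cons, stepB, ih]
    simp only [keptOf, List.map_cons, List.filter_cons]
    by_cases hk : keepW (PySem.Chars.rstrip w.toList) <;> simp [hk]

-- ===== VERDICT (by name: the statement is the Claim_ definition above) =====
theorem psy_word_spec : Claim_equal_psy_word := by
  intro data _
  unfold Spec_psy_word psy_word psy_word_alt
  rw [foldA, foldB]
  simp only [List.nil_append, split₀_flat, List.map_flatMap]
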